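-- pv_equiv track=rewrite | github.com/EytleBB/CS-Prophet | tools/hltv/parser.py | get_map_from_dem_filename
-- ===== SOURCE A (Python) =====
-- KNOWN_MAPS = {
--     "de_mirage", "de_inferno", "de_dust2",
--     "de_nuke", "de_ancient", "de_overpass", "de_anubis",
-- }
--
-- _MAP_DISPLAY_TO_KEY = {m.replace("de_", ""): m for m in KNOWN_MAPS}
--
-- def get_map_from_dem_filename(filename: str) -> str | None:
--     """
--     Infer CS2 map name from a .dem filename.
--     "navi-vs-faze-m1-de_mirage.dem" → "de_mirage"
--     "match-inferno.dem" → "de_inferno"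
--     "match-vertigo.dem" → None
--     """
--     stem = filename.lower().replace(".dem", "")
--     for part in stem.split("-"):
--         if part in KNOWN_MAPS:
--             return part
--     for part in stem.split("-"):
--         if part in _MAP_DISPLAY_TO_KEY:
--             return _MAP_DISPLAY_TO_KEY[part]
--     return None
-- ===== SOURCE B (Python) =====
-- KNOWN_MAPS = {
--     "de_mirage", "de_inferno", "de_dust2",
--     "de_nuke", "de_ancient", "de_overpass", "de_anubis",
-- }
--
-- _MAP_DISPLAY_TO_KEY = {m.replace("de_", ""): m for m in KNOWN_MAPS}
--
-- def get_map_from_dem_filename(filename: str) -> str | None: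
--     """Single pass: full map names win immediately; the first display-name
--     match is kept as a provisional fallback."""
--     fallback = None
--     for part in filename.lower().replace(".dem", "").split("-"):
--         if part in KNOWN_MAPS:
--             return part
--         if fallback is None:
--             fallback = _MAP_DISPLAY_TO_KEY.get(part)
--     return fallback
-- ===== Notes on version B (the rewrite author's own statement) =====
-- stated objective: simpler
-- what changed: Replaced A's two sequential scans of the split parts by a single pass that returns full map names eagerly and remembers only the first display-name match as a fallback.
import Mathlib
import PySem

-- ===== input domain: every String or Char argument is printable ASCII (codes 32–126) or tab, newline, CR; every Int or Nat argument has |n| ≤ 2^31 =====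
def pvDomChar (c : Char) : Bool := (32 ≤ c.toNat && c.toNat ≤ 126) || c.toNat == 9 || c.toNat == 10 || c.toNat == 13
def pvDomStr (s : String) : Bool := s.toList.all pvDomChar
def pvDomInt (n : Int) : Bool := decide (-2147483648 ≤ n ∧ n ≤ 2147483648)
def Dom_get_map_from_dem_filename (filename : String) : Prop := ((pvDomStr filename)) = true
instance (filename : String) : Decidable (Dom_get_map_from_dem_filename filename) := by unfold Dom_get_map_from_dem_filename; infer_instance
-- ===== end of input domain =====

-- B replaces A's two sequential scans of the split parts by one pass with a provisional
-- fallback for the first display-name match (objective: simpler).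

-- ===== PORT A =====
def pvKnownMaps : PySem.Set String := PySem.Set.ofList
  ["de_mirage", "de_inferno", "de_dust2", "de_nuke", "de_ancient", "de_overpass", "de_anubis"]

def pvDisplayToKey : PySem.Dict String String :=
  PySem.Dict.ofList (pvKnownMaps.map (fun m => (PySem.Str.replace m "de_" "", m)))

-- first for-loop of A: first part that is a full known map name
def pvLoopFull : List String → Option String
  | [] => none
  | p :: ps => if PySem.Set.contains pvKnownMaps p then some p else pvLoopFull ps

-- second for-loop of A: first part that is a display name, mapped through the dict
def pvLoopDisplay : List String → Option String
  | [] => none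
  | p :: ps => if PySem.Dict.contains pvDisplayToKey p then PySem.Dict.get? pvDisplayToKey p
               else pvLoopDisplay ps

def get_map_from_dem_filename (filename : String) : Option String :=
  let stem := PySem.Str.replace (PySem.Str.lower filename) ".dem" ""
  let parts := (PySem.Str.split? stem "-").getD []   -- sep "-" ≠ "", so split? is always some
  match pvLoopFull parts with
  | some m => some m
  | none => pvLoopDisplay parts

-- ===== PORT B =====
-- single loop of Source B, carrying the provisional fallback
def pvLoopB : List String → Option String → Option String
  | [], fb => fb
  | p :: ps, fb =>
      if PySem.Set.contains pvKnownMaps p then some p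
      else match fb with
        | some w => pvLoopB ps (some w)
        | none => pvLoopB ps (PySem.Dict.get? pvDisplayToKey p)

def get_map_from_dem_filename_alt (filename : String) : Option String :=
  pvLoopB ((PySem.Str.split? (PySem.Str.replace (PySem.Str.lower filename) ".dem" "") "-").getD []) none

-- ===== PRECONDITION & SPEC =====
def Spec_get_map_from_dem_filename (filename : String) (out : Option String) : Prop := out = get_map_from_dem_filename_alt filename
instance (filename : String) (out : Option String) : Decidable (Spec_get_map_from_dem_filename filename out) := by unfold Spec_get_map_from_dem_filename; infer_instance

-- ===== CLAIM (what is proved, stated in full; the proofs are below) =====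
def Claim_equal_get_map_from_dem_filename : Prop := ∀ (filename : String), Dom_get_map_from_dem_filename filename → Spec_get_map_from_dem_filename filename (get_map_from_dem_filename filename)

-- ===== LEMMAS AND PROOFS =====

-- loop invariant: one pass with a fallback = full-name pass, else the fallback, else display pass
theorem pvLoopB_eq (parts : List String) (fb : Option String) :
    pvLoopB parts fb =
      match pvLoopFull parts with
      | some m => some m
      | none => match fb with
                | some w => some w
                | none => pvLoopDisplay parts := by
  induction parts generalizing fb with
  | nil => cases fb <;> rfl
  | cons p ps ih =>
    simp only [pvLoopB, pvLoopFull, pvLoopDisplay]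
    by_cases hk : PySem.Set.contains pvKnownMaps p = true
    · cases fb <;> simp only [if_pos hk]
    · simp only [if_neg hk]
      rw [PySem.Dict.contains_eq_isSome_get? pvDisplayToKey p]
      simp only [ih]
      cases fb <;> cases hg : PySem.Dict.get? pvDisplayToKey p <;>
        simp only [hg] <;> cases pvLoopFull ps <;> rfl

theorem get_map_from_dem_filename_spec' (filename : String) :
    get_map_from_dem_filename filename = get_map_from_dem_filename_alt filename := by
  unfold get_map_from_dem_filename get_map_from_dem_filename_alt
  rw [pvLoopB_eq]

-- ===== VERDICT (by name: the statement is the Claim_ definition above) =====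
theorem get_map_from_dem_filename_spec : Claim_equal_get_map_from_dem_filename := by
  intro filename _
  exact get_map_from_dem_filename_spec' filename
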